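-- pv_equiv track=rewrite | github.com/FairXAI/Strategic_ICL_Tabular | utils.py | split_by_sens
-- ===== SOURCE A (Python) =====
-- def split_by_sens(bin_ytst, bin_ypre, sens):
--     group_0_indices = [i for i, value in enumerate(sens) if value == 0]
--     group_1_indices = [i for i, value in enumerate(sens) if value == 1]
--
--     group_0_ytst = [bin_ytst[i] for i in group_0_indices]
--     group_0_ypre = [bin_ypre[i] for i in group_0_indices]
--
--     group_1_ytst = [bin_ytst[i] for i in group_1_indices]
--     group_1_ypre = [bin_ypre[i] for i in group_1_indices]
--
--     return group_0_ytst, group_0_ypre, group_1_ytst, group_1_ypre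
-- ===== SOURCE B (Python) =====
-- def split_by_sens(bin_ytst, bin_ypre, sens):
--     g0t, g0p, g1t, g1p = [], [], [], []
--     for i in range(len(sens)):
--         v = sens[i]
--         if v == 0:
--             g0t.append(bin_ytst[i])
--             g0p.append(bin_ypre[i])
--         elif v == 1:
--             g1t.append(bin_ytst[i])
--             g1p.append(bin_ypre[i])
--     return g0t, g0p, g1t, g1p
-- ===== Notes on version B (the rewrite author's own statement) =====
-- stated objective: faster
-- what changed: Replaces A's six passes (two enumerate-filter index-list builds plus four indexed gathers) with one single pass over sens that appends each label/prediction pair directly to its group's lists; one traversal instead of six.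
-- outside the precondition, e.g. on split_by_sens([1], [1], [0, 1]): A raises IndexError, B raises IndexError
import Mathlib
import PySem

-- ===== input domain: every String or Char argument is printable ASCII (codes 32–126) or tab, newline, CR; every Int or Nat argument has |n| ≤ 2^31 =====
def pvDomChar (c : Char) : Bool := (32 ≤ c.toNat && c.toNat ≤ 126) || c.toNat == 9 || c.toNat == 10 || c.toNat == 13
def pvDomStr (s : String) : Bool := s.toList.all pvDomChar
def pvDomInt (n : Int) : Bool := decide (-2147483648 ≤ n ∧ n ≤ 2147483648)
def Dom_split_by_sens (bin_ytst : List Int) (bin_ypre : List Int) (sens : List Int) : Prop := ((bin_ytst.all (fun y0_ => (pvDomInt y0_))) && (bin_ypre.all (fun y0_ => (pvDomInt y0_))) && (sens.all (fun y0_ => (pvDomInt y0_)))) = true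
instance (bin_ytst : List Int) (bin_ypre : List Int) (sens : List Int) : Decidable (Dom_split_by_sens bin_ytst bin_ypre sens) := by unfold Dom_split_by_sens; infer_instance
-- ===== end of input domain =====

-- ===== PORT A =====
-- B replaces A's six comprehension passes with one single pass; equivalence is proved on all
-- inputs where A's Python returns (Pre_: every 0/1 entry of sens indexes into both label lists).
-- Out-of-range bin_ytst[i]/bin_ypre[i] raise IndexError in Python; ported with pyGetD (exact under Pre_).
def split_by_sens (bin_ytst : List Int) (bin_ypre : List Int) (sens : List Int) : List Int × List Int × List Int × List Int :=
  let group_0_indices := ((PySem.List.enumerate sens).filter (fun p => p.2 == 0)).map (fun p => p.1)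
  let group_1_indices := ((PySem.List.enumerate sens).filter (fun p => p.2 == 1)).map (fun p => p.1)
  let group_0_ytst := group_0_indices.map (fun i => PySem.List.pyGetD bin_ytst i 0)
  let group_0_ypre := group_0_indices.map (fun i => PySem.List.pyGetD bin_ypre i 0)
  let group_1_ytst := group_1_indices.map (fun i => PySem.List.pyGetD bin_ytst i 0)
  let group_1_ypre := group_1_indices.map (fun i => PySem.List.pyGetD bin_ypre i 0)
  (group_0_ytst, group_0_ypre, group_1_ytst, group_1_ypre)

-- ===== PORT B =====
-- single pass over sens with the running index and the four accumulator lists (Source B's loop)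
def split_by_sens_altGo (bin_ytst : List Int) (bin_ypre : List Int) (i : Int) :
    List Int → List Int × List Int × List Int × List Int → List Int × List Int × List Int × List Int
  | [], acc => acc
  | v :: rest, (g0t, g0p, g1t, g1p) =>
    if v == 0 then
      split_by_sens_altGo bin_ytst bin_ypre (i + 1) rest
        (g0t ++ [PySem.List.pyGetD bin_ytst i 0], g0p ++ [PySem.List.pyGetD bin_ypre i 0], g1t, g1p)
    else if v == 1 then
      split_by_sens_altGo bin_ytst bin_ypre (i + 1) rest
        (g0t, g0p, g1t ++ [PySem.List.pyGetD bin_ytst i 0], g1p ++ [PySem.List.pyGetD bin_ypre i 0])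
    else
      split_by_sens_altGo bin_ytst bin_ypre (i + 1) rest (g0t, g0p, g1t, g1p)

def split_by_sens_alt (bin_ytst : List Int) (bin_ypre : List Int) (sens : List Int) : List Int × List Int × List Int × List Int :=
  split_by_sens_altGo bin_ytst bin_ypre 0 sens ([], [], [], [])

-- ===== PRECONDITION & SPEC =====
-- Pre_ excludes exactly the inputs where the Python A raises IndexError: a position i with
-- sens[i] ∈ {0,1} but i out of range for bin_ytst or bin_ypre (B raises there too).
def Pre_split_by_sens (bin_ytst : List Int) (bin_ypre : List Int) (sens : List Int) : Prop :=
  ∀ i ∈ List.range sens.length, (sens.getD i 0 = 0 ∨ sens.getD i 0 = 1) →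
    i < bin_ytst.length ∧ i < bin_ypre.length
instance (bin_ytst : List Int) (bin_ypre : List Int) (sens : List Int) : Decidable (Pre_split_by_sens bin_ytst bin_ypre sens) := by unfold Pre_split_by_sens; infer_instance
def pvWitness_split_by_sens : List Int × List Int × List Int := ([5, 7, 9], [1, 0, 1], [0, 1, 2])
def Spec_split_by_sens (bin_ytst : List Int) (bin_ypre : List Int) (sens : List Int) (out : List Int × List Int × List Int × List Int) : Prop := out = split_by_sens_alt bin_ytst bin_ypre sens
instance (bin_ytst : List Int) (bin_ypre : List Int) (sens : List Int) (out : List Int × List Int × List Int × List Int) : Decidable (Spec_split_by_sens bin_ytst bin_ypre sens out) := by unfold Spec_split_by_sens; infer_instance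

-- ===== CLAIM (what is proved, stated in full; the proofs are below) =====
def Claim_equal_split_by_sens : Prop := ∀ (bin_ytst : List Int) (bin_ypre : List Int) (sens : List Int), Dom_split_by_sens bin_ytst bin_ypre sens → Pre_split_by_sens bin_ytst bin_ypre sens → Spec_split_by_sens bin_ytst bin_ypre sens (split_by_sens bin_ytst bin_ypre sens)

-- ===== LEMMAS AND PROOFS =====
-- loop invariant: the single-pass fold appends A's four comprehension results (taken from index i on)
theorem split_by_sens_altGo_eq (bin_ytst bin_ypre : List Int) (sens : List Int) (i : Int)
    (g0t g0p g1t g1p : List Int) :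
    split_by_sens_altGo bin_ytst bin_ypre i sens (g0t, g0p, g1t, g1p) =
      (g0t ++ (((PySem.List.enumerate sens i).filter (fun p => p.2 == 0)).map (fun p => p.1)).map
          (fun j => PySem.List.pyGetD bin_ytst j 0),
       g0p ++ (((PySem.List.enumerate sens i).filter (fun p => p.2 == 0)).map (fun p => p.1)).map
          (fun j => PySem.List.pyGetD bin_ypre j 0),
       g1t ++ (((PySem.List.enumerate sens i).filter (fun p => p.2 == 1)).map (fun p => p.1)).map
          (fun j => PySem.List.pyGetD bin_ytst j 0),
       g1p ++ (((PySem.List.enumerate sens i).filter (fun p => p.2 == 1)).map (fun p => p.1)).map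
          (fun j => PySem.List.pyGetD bin_ypre j 0)) := by
  induction sens generalizing i g0t g0p g1t g1p with
  | nil => simp [split_by_sens_altGo, PySem.List.enumerate_nil]
  | cons v rest ih =>
    by_cases h0 : v = 0
    · simp [split_by_sens_altGo, PySem.List.enumerate_cons, h0, ih, List.append_assoc]
    · by_cases h1 : v = 1
      · simp [split_by_sens_altGo, PySem.List.enumerate_cons, h1, ih, List.append_assoc]
      · simp [split_by_sens_altGo, PySem.List.enumerate_cons, h0, h1, ih]

-- ===== VERDICT (by name: the statement is the Claim_ definition above) =====
theorem split_by_sens_spec : Claim_equal_split_by_sens := by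
  intro bin_ytst bin_ypre sens _ _
  unfold Spec_split_by_sens split_by_sens split_by_sens_alt
  simp [split_by_sens_altGo_eq]
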